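-- pv_equiv track=rewrite | github.com/miliar/Code_Jam_Webscraper | solutions_python/Problem_155/2505.py | guests
-- ===== SOURCE A (Python) =====
-- def guests(max_shyness, audience):
--   if max_shyness == 0:
--     return 0
--   shy_level = 0
--   curr_level = 0
--   additions = 0
--   for each in str(audience):
--     each = int(each)
--     curr_level += each
--     if (shy_level >= curr_level):
--       difference = shy_level-curr_level+1
--       curr_level += difference
--       additions += difference
--     shy_level += 1
--   return additions
-- ===== SOURCE B (Python) =====
-- def guests(max_shyness, audience):
--     if max_shyness == 0:
--         return 0
--     digits = [int(c) for c in str(audience)]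
--     prefixes = []
--     total = 0
--     for d in digits:
--         total += d
--         prefixes.append(total)
--     deficits = [i + 1 - p for i, p in enumerate(prefixes)]
--     return max([0] + deficits)
-- ===== Notes on version B (the rewrite author's own statement) =====
-- stated objective: simpler
-- what changed: B replaces A's stateful simulation of corrective additions by staged passes: build the digit list, its inclusive prefix sums, the list of prefix deficits i+1-P_i, and return the maximum of 0 and those deficits.
-- outside the precondition, e.g. on guests(1, -5): A raises ValueError, B raises ValueError
import Mathlib
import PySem

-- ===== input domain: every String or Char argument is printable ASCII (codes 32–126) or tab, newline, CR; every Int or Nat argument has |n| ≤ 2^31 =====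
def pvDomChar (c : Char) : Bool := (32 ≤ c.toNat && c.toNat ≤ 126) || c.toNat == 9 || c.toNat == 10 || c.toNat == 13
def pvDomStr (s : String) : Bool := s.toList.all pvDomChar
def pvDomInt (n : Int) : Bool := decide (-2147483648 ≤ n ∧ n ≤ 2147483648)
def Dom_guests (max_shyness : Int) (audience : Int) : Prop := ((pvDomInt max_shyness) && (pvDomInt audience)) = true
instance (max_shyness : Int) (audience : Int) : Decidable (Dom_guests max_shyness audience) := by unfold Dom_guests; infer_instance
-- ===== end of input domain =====

-- B replaces A's stateful simulation of corrective additions by staged passes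
-- (digits, prefix sums, deficits, then max); objective: simpler. Equal return value on Pre_.

-- ===== PORT A =====
-- int(ch) for a single character; for a digit this is its value (exact on Pre_; '-' is excluded by Pre_)
def pyDigit (c : Char) : Int := (PySem.Int.ofStr? (String.ofList [c])).getD 0

def guestsLoopA : List Char → Int → Int → Int → Int
  | [], _, _, additions => additions
  | c :: rest, shy_level, curr_level, additions =>
      let each := pyDigit c
      let curr_level := curr_level + each
      if shy_level ≥ curr_level then
        let difference := shy_level - curr_level + 1
        guestsLoopA rest (shy_level + 1) (curr_level + difference) (additions + difference)
      else
        guestsLoopA rest (shy_level + 1) curr_level additions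

def guests (max_shyness : Int) (audience : Int) : Int :=
  if max_shyness = 0 then 0
  else guestsLoopA (PySem.Int.toStr audience).toList 0 0 0

-- ===== PORT B =====
-- inclusive prefix sums of the digit list ('for d in digits: total += d; prefixes.append(total)')
def prefixScan : List Int → Int → List Int
  | [], _ => []
  | d :: rest, total => (total + d) :: prefixScan rest (total + d)

def guests_alt (max_shyness : Int) (audience : Int) : Int :=
  if max_shyness = 0 then 0
  else
    let digits := (PySem.Int.toStr audience).toList.map pyDigit
    let prefixes := prefixScan digits 0
    let deficits := (PySem.List.enumerate prefixes).map (fun q => q.1 + 1 - q.2)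
    (PySem.List.max? (0 :: deficits) (fun x => x)).getD 0

-- ===== PRECONDITION & SPEC =====
-- Pre_ excludes max_shyness ≠ 0 with audience < 0: there str(audience) contains '-' and
-- both A and B raise ValueError on int('-').
def Pre_guests (max_shyness : Int) (audience : Int) : Prop :=
  max_shyness = 0 ∨ 0 ≤ audience
instance (max_shyness : Int) (audience : Int) : Decidable (Pre_guests max_shyness audience) := by
  unfold Pre_guests; infer_instance

def pvWitness_guests : Int × Int := (4, 11)

def Spec_guests (max_shyness : Int) (audience : Int) (out : Int) : Prop := out = guests_alt max_shyness audience
instance (max_shyness : Int) (audience : Int) (out : Int) : Decidable (Spec_guests max_shyness audience out) := by unfold Spec_guests; infer_instance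

-- ===== CLAIM (what is proved, stated in full; the proofs are below) =====
def Claim_equal_guests : Prop := ∀ (max_shyness : Int) (audience : Int), Dom_guests max_shyness audience → Pre_guests max_shyness audience → Spec_guests max_shyness audience (guests max_shyness audience)

-- ===== LEMMAS AND PROOFS =====

-- Invariant: A's loop with state (shy, P + M, M) computes the running max M of the
-- prefix deficits shy+j+1 − (P + prefix sum of the first j+1 digits).
theorem loopA_eq_foldl_max : ∀ (cs : List Char) (shy P M : Int),
    guestsLoopA cs shy (P + M) M
      = ((PySem.List.enumerate (prefixScan (cs.map pyDigit) P) shy).map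
          (fun q => q.1 + 1 - q.2)).foldl max M := by
  intro cs
  induction cs with
  | nil => intro shy P M; rfl
  | cons c rest ih =>
      intro shy P M
      simp only [guestsLoopA, List.map, prefixScan, PySem.List.enumerate_cons, List.foldl]
      by_cases h : shy ≥ P + M + pyDigit c
      · rw [if_pos h]
        have e1 : P + M + pyDigit c + (shy - (P + M + pyDigit c) + 1)
            = (P + pyDigit c) + (shy + 1 - (P + pyDigit c)) := by ring
        have e2 : M + (shy - (P + M + pyDigit c) + 1) = shy + 1 - (P + pyDigit c) := by ring
        have e3 : max M (shy + 1 - (P + pyDigit c)) = shy + 1 - (P + pyDigit c) := by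
          apply max_eq_right; omega
        rw [e1, e2, ih, e3]
      · rw [if_neg h]
        have e3 : max M (shy + 1 - (P + pyDigit c)) = M := by
          apply max_eq_left; omega
        have e1 : P + M + pyDigit c = (P + pyDigit c) + M := by ring
        rw [e1, ih, e3]

-- ===== VERDICT (by name: the statement is the Claim_ definition above) =====
theorem guests_spec : Claim_equal_guests := by
  intro ms aud _ _
  unfold Spec_guests guests guests_alt
  by_cases h : ms = 0
  · simp [h]
  · rw [if_neg h, if_neg h]
    simp only [PySem.List.max?_id_cons, Option.getD_some]
    simpa using loopA_eq_foldl_max (PySem.Int.toStr aud).toList 0 0 0
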